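-- pv_equiv track=rewrite | github.com/baldFemale/OpenInnovationFramework | Landscapes/CoarseLandscape.py | coarse_state_alternatives
-- ===== SOURCE A (Python) =====
-- from itertools import product
--
-- def coarse_state_alternatives(coarse_state=None):
--     alternative_pool = []
--     for bit in coarse_state:
--         if bit in ["0", "1", "2", "3"]:
--             alternative_pool.append(bit)
--         elif bit == "A":
--             alternative_pool.append(["0", "1"])
--         elif bit == "B":
--             alternative_pool.append(["2", "3"])
--         elif bit == "*":
--             alternative_pool.append(["0", "1", "2", "3"])
--         else:
--             raise ValueError("Unsupported bit value: ", bit)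
--     return [i for i in product(*alternative_pool)]
-- ===== SOURCE B (Python) =====
-- def coarse_state_alternatives(coarse_state=None):
--     def choices(bit):
--         if bit in ("0", "1", "2", "3"):
--             return [bit]
--         if bit == "A":
--             return ["0", "1"]
--         if bit == "B":
--             return ["2", "3"]
--         if bit == "*":
--             return ["0", "1", "2", "3"]
--         raise ValueError("Unsupported bit value: ", bit)
--
--     def expand(bits):
--         if not bits:
--             return [()]
--         cs = choices(bits[0])
--         rest = expand(bits[1:])
--         return [(c,) + r for c in cs for r in rest]
--
--     return expand(coarse_state)
-- ===== Notes on version B (the rewrite author's own statement) =====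
-- stated objective: alternative
-- what changed: Replaces the build-a-pool-then-itertools.product two-phase design with a direct structural recursion on the bit list that expands each prefix choice against the recursively expanded suffix, never materialising the pool.
import Mathlib
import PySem

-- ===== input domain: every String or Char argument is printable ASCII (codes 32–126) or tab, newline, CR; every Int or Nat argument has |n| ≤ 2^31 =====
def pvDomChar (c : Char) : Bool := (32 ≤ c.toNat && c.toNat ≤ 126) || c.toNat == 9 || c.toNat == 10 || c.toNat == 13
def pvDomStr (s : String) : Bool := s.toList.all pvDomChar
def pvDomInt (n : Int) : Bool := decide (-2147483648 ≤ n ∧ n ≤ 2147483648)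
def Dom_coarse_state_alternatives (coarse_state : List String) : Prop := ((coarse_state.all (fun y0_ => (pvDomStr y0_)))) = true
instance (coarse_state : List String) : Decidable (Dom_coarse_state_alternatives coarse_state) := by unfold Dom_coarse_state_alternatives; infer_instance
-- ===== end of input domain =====

-- B replaces the pool-then-itertools.product two-phase design of A with a direct
-- structural recursion expanding each bit's choices against the expanded suffix (objective: alternative).


-- ===== PORT A =====
-- A's loop body: classify one bit into its iterable of concrete values
-- (a concrete bit "0".."3" is appended as the string itself; product iterates it
--  as its character sequence, which for these one-char strings is [bit]);
-- none = the ValueError branch.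
def pvChoiceA (bit : String) : Option (List String) :=
  if bit ∈ (["0", "1", "2", "3"] : List String) then some [bit]
  else if bit = "A" then some ["0", "1"]
  else if bit = "B" then some ["2", "3"]
  else if bit = "*" then some ["0", "1", "2", "3"]
  else none

-- the for-loop building alternative_pool (accumulator = pool so far; none = raised)
def pvBuildPool : List String → List (List String) → Option (List (List String))
  | [], pool => some pool
  | bit :: rest, pool =>
      match pvChoiceA bit with
      | some c => pvBuildPool rest (pool ++ [c])
      | none => none

-- itertools.product(*pool): first factor varies slowest
def pvProduct : List (List String) → List (List String)
  | [] => [[]]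
  | p :: ps => p.flatMap (fun c => (pvProduct ps).map (fun r => c :: r))

def coarse_state_alternatives (coarse_state : List String) : List (List String) :=
  match pvBuildPool coarse_state [] with
  | some pool => pvProduct pool
  | none => []   -- unreachable under Pre_ (A raises ValueError there)

-- ===== PORT B =====
-- Source B's choices(bit); none = the raise
def pvChoiceB (bit : String) : Option (List String) :=
  if bit = "0" ∨ bit = "1" ∨ bit = "2" ∨ bit = "3" then some [bit]
  else if bit = "A" then some ["0", "1"]
  else if bit = "B" then some ["2", "3"]
  else if bit = "*" then some ["0", "1", "2", "3"]
  else none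

-- Source B's expand(bits): direct recursion, no intermediate pool
def pvExpand : List String → Option (List (List String))
  | [] => some [[]]
  | bit :: bits => do
      let cs ← pvChoiceB bit
      let rest ← pvExpand bits
      pure (cs.flatMap (fun c => rest.map (fun r => c :: r)))

def coarse_state_alternatives_alt (coarse_state : List String) : List (List String) :=
  (pvExpand coarse_state).getD []   -- none unreachable under Pre_ (B raises ValueError there)

-- ===== PRECONDITION & SPEC =====
-- Pre_ excludes exactly the inputs containing an unsupported bit, on which A raises ValueError.
def Pre_coarse_state_alternatives (coarse_state : List String) : Prop :=
  ∀ bit ∈ coarse_state, bit ∈ (["0", "1", "2", "3", "A", "B", "*"] : List String)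
instance (coarse_state : List String) : Decidable (Pre_coarse_state_alternatives coarse_state) := by
  unfold Pre_coarse_state_alternatives; infer_instance

def pvWitness_coarse_state_alternatives : List String := ["2", "A", "*"]

def Spec_coarse_state_alternatives (coarse_state : List String) (out : List (List String)) : Prop := out = coarse_state_alternatives_alt coarse_state
instance (coarse_state : List String) (out : List (List String)) : Decidable (Spec_coarse_state_alternatives coarse_state out) := by unfold Spec_coarse_state_alternatives; infer_instance

-- ===== CLAIM (what is proved, stated in full; the proofs are below) =====
def Claim_equal_coarse_state_alternatives : Prop := ∀ (coarse_state : List String), Dom_coarse_state_alternatives coarse_state → Pre_coarse_state_alternatives coarse_state → Spec_coarse_state_alternatives coarse_state (coarse_state_alternatives coarse_state)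

-- ===== LEMMAS AND PROOFS =====

lemma pvChoice_eq (bit : String) : pvChoiceB bit = pvChoiceA bit := by
  unfold pvChoiceA pvChoiceB
  simp [List.mem_cons]

def pvPoolOf (cs : List String) : List (List String) := cs.filterMap pvChoiceA

lemma pvChoiceA_isSome_of_pre (bit : String)
    (h : bit ∈ (["0", "1", "2", "3", "A", "B", "*"] : List String)) :
    ∃ c, pvChoiceA bit = some c := by
  unfold pvChoiceA
  simp only [List.mem_cons, List.not_mem_nil, or_false] at h
  rcases h with h | h | h | h | h | h | h <;> subst h <;> simp

lemma pvBuildPool_some (cs : List String)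
    (h : Pre_coarse_state_alternatives cs) :
    ∀ pool, pvBuildPool cs pool = some (pool ++ pvPoolOf cs) := by
  induction cs with
  | nil => intro pool; simp [pvBuildPool, pvPoolOf]
  | cons b bs ih =>
      intro pool
      obtain ⟨c, hc⟩ := pvChoiceA_isSome_of_pre b (h b (by simp))
      have hbs : Pre_coarse_state_alternatives bs := fun x hx => h x (by simp [hx])
      simp only [pvBuildPool, hc, ih hbs]
      simp [pvPoolOf, hc, List.append_assoc]

lemma pvA_eq_product (cs : List String)
    (h : Pre_coarse_state_alternatives cs) :
    coarse_state_alternatives cs = pvProduct (pvPoolOf cs) := by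
  unfold coarse_state_alternatives
  simp [pvBuildPool_some cs h []]

lemma pvExpand_eq (cs : List String)
    (h : Pre_coarse_state_alternatives cs) :
    pvExpand cs = some (pvProduct (pvPoolOf cs)) := by
  induction cs with
  | nil => simp [pvExpand, pvPoolOf, pvProduct]
  | cons b bs ih =>
      obtain ⟨c, hc⟩ := pvChoiceA_isSome_of_pre b (h b (by simp))
      have hbs : Pre_coarse_state_alternatives bs := fun x hx => h x (by simp [hx])
      simp [pvExpand, pvChoice_eq, hc, ih hbs, pvPoolOf, pvProduct]

-- ===== VERDICT (by name: the statement is the Claim_ definition above) =====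
theorem coarse_state_alternatives_spec : Claim_equal_coarse_state_alternatives := by
  intro cs _ hpre
  unfold Spec_coarse_state_alternatives coarse_state_alternatives_alt
  rw [pvExpand_eq cs hpre, pvA_eq_product cs hpre]
  rfl
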